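-- pv_equiv track=rewrite | github.com/Chr1sChanman/python-practice | tip102/u3s1-GuestOrder.py | arrange_guest_arrival_order
-- ===== SOURCE A (Python) =====
-- def arrange_guest_arrival_order(arrival_pattern):
--     count = 1
--     ans = []
--     stack = []
--     for i in range(len(arrival_pattern)):
--         stack.append(count)
--         if arrival_pattern[i] == 'I':
--             while stack:
--                 ans.append(stack.pop())
--         count += 1
--
--     stack.append(count)
--     while stack:
--         ans.append(stack.pop())
--
--     return ''.join(map(str, ans))
-- ===== SOURCE B (Python) =====
-- def arrange_guest_arrival_order(arrival_pattern):
--     n = len(arrival_pattern)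
--     result = list(range(1, n + 2))
--     i = 0
--     while i < n:
--         if arrival_pattern[i] == 'I':
--             i += 1
--         else:
--             j = i
--             while j < n and arrival_pattern[j] != 'I':
--                 j += 1
--             result[i:j + 1] = result[i:j + 1][::-1]
--             i = j
--     return ''.join(map(str, result))
-- ===== Notes on version B (the rewrite author's own statement) =====
-- stated objective: alternative
-- what changed: B precomputes the identity arrangement 1..n+1 and reverses the slice under each maximal run of non-'I' characters in place, instead of simulating a stack of pending counts that is flushed on every 'I'.
import Mathlib
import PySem

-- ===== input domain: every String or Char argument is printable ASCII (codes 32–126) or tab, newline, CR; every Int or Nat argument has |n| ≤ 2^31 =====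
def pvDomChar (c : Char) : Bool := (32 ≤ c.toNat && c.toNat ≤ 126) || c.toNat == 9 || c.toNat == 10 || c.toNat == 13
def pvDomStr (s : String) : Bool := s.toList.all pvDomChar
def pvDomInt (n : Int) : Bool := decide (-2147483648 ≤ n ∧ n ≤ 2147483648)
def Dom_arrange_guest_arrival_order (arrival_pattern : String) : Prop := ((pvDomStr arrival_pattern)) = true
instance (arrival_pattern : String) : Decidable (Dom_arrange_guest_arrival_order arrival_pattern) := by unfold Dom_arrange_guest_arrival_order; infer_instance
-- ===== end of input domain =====

-- B builds the identity list 1..n+1 and reverses the slice under each maximal non-'I' run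
-- in place, instead of A's stack of pending counts flushed on each 'I' (alternative, same cost).

-- ===== PORT A =====
-- literal transliteration of A: one fold over the characters carrying (count, ans, stack)
-- the loop body: stack.append(count); on 'I' flush the stack (pop-reversed) onto ans
def pvStepA (s : Int × List Int × List Int) (c : Char) : Int × List Int × List Int :=
  if c == 'I' then (s.1 + 1, s.2.1 ++ (s.2.2 ++ [s.1]).reverse, ([] : List Int))
  else (s.1 + 1, s.2.1, s.2.2 ++ [s.1])

def arrange_guest_arrival_order (arrival_pattern : String) : String :=
  let fin := arrival_pattern.toList.foldl pvStepA (1, [], [])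
  let ans := fin.2.1 ++ (fin.2.2 ++ [fin.1]).reverse
  PySem.Str.join "" (ans.map PySem.Int.toStr)

-- ===== PORT B =====
-- inner while: advance j past the run of non-'I' characters
def pvFindRun (cs : List Char) (n j : Nat) : Nat :=
  if h : j < n then
    if cs.getD j ' ' ≠ 'I' then pvFindRun cs n (j + 1) else j
  else j
termination_by n - j

-- termination fact the outer loop's recursion needs: j strictly advances on a non-'I' char
theorem pvFindRun_gt (cs : List Char) (n i : Nat) (h : i < n) (hc : cs.getD i ' ' ≠ 'I') :
    i < pvFindRun cs n i := by
  unfold pvFindRun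
  rw [dif_pos h, if_pos hc]
  have : i + 1 ≤ pvFindRun cs n (i + 1) := by
    generalize hk : n - (i+1) = k
    induction k generalizing i with
    | zero => unfold pvFindRun; rw [dif_neg (by omega)]
    | succ k ih =>
      unfold pvFindRun
      by_cases h1 : i + 1 < n
      · rw [dif_pos h1]
        by_cases h2 : cs.getD (i+1) ' ' ≠ 'I'
        · rw [if_pos h2]
          have := ih (i+1) h1 h2 (by omega)
          omega
        · rw [if_neg h2]
      · rw [dif_neg h1]
  omega

-- outer while loop of B, recursion on n - i
def pvLoopB (cs : List Char) (n i : Nat) (res : List Int) : List Int :=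
  if _h : i < n then
    if hc : cs.getD i ' ' = 'I' then pvLoopB cs n (i + 1) res
    else
      let j := pvFindRun cs n i
      -- result[i:j+1] = result[i:j+1][::-1]
      let res' := res.take i ++ ((res.drop i).take (j + 1 - i)).reverse ++ res.drop (j + 1)
      pvLoopB cs n j res'
  else res
termination_by n - i
decreasing_by
  · omega
  · have := pvFindRun_gt cs n i _h hc; omega

def arrange_guest_arrival_order_alt (arrival_pattern : String) : String :=
  let cs := arrival_pattern.toList
  let n := cs.length
  let res := pvLoopB cs n 0 (PySem.List.pyRange 1 (n + 2) 1)
  PySem.Str.join "" (res.map PySem.Int.toStr)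

-- ===== PRECONDITION & SPEC =====
def Spec_arrange_guest_arrival_order (arrival_pattern : String) (out : String) : Prop := out = arrange_guest_arrival_order_alt arrival_pattern
instance (arrival_pattern : String) (out : String) : Decidable (Spec_arrange_guest_arrival_order arrival_pattern out) := by unfold Spec_arrange_guest_arrival_order; infer_instance

-- ===== CLAIM (what is proved, stated in full; the proofs are below) =====
def Claim_equal_arrange_guest_arrival_order : Prop := ∀ (arrival_pattern : String), Dom_arrange_guest_arrival_order arrival_pattern → Spec_arrange_guest_arrival_order arrival_pattern (arrange_guest_arrival_order arrival_pattern)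

-- ===== LEMMAS AND PROOFS =====

-- ascending run of integers k, k+1, …, k+L-1
def pvAsc (k : Int) : Nat → List Int
  | 0 => []
  | L + 1 => k :: pvAsc (k + 1) L

theorem pvAsc_length (k : Int) (L : Nat) : (pvAsc k L).length = L := by
  induction L generalizing k with
  | zero => rfl
  | succ L ih => simp [pvAsc, ih]

theorem pvAsc_take (k : Int) (L m : Nat) : (pvAsc k L).take m = pvAsc k (min m L) := by
  induction L generalizing k m with
  | zero => simp [pvAsc]
  | succ L ih =>
    cases m with
    | zero => simp [pvAsc]
    | succ m => simp [pvAsc, ih, Nat.succ_min_succ]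

theorem pvAsc_drop (k : Int) (L m : Nat) : (pvAsc k L).drop m = pvAsc (k + m) (L - m) := by
  induction L generalizing k m with
  | zero => simp [pvAsc]
  | succ L ih =>
    cases m with
    | zero => simp [pvAsc]
    | succ m =>
      simp only [pvAsc, List.drop_succ_cons, ih]
      rw [show k + (m + 1 : Nat) = (k + 1) + (m : Nat) by push_cast; ring]
      congr 1
      omega

theorem pyRange_eq_pvAsc (k : Int) (L : Nat) : PySem.List.pyRange k (k + L) 1 = pvAsc k L := by
  induction L generalizing k with
  | zero => simp [pvAsc, PySem.List.pyRange_one_eq_nil]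
  | succ L ih =>
    rw [PySem.List.pyRange_one_cons (by omega), pvAsc]
    rw [show k + (L + 1 : Nat) = (k + 1) + (L : Nat) by push_cast; ring, ih]

-- the common reference: A's pending-stack recursion written structurally
def pvFlush : List Char → Int → List Int → List Int
  | [], k, st => (st ++ [k]).reverse
  | c :: cs, k, st =>
    if c = 'I' then (st ++ [k]).reverse ++ pvFlush cs (k + 1) []
    else pvFlush cs (k + 1) (st ++ [k])

-- A's fold computes pvFlush
theorem pvA_fold (cs : List Char) : ∀ (k : Int) (ans st : List Int),
    (let fin := cs.foldl pvStepA (k, ans, st)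
     fin.2.1 ++ (fin.2.2 ++ [fin.1]).reverse) = ans ++ pvFlush cs k st := by
  induction cs with
  | nil => intro k ans st; simp [pvFlush]
  | cons c cs ih =>
    intro k ans st
    simp only [List.foldl_cons]
    by_cases hc : c = 'I'
    · rw [show pvStepA (k, ans, st) c = (k + 1, ans ++ (st ++ [k]).reverse, ([] : List Int)) by
        simp [pvStepA, hc]]
      simp only [pvFlush, if_pos hc]
      rw [show ((k : Int) + 1, ans ++ (st ++ [k]).reverse, ([] : List Int)) = ((k+1 : Int), ans ++ (st ++ [k]).reverse, ([] : List Int)) from rfl]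
      have := ih (k+1) (ans ++ (st ++ [k]).reverse) []
      simp only at this ⊢
      rw [this]
      simp
    · rw [show pvStepA (k, ans, st) c = (k + 1, ans, st ++ [k]) by simp [pvStepA, hc]]
      simp only [pvFlush, if_neg hc]
      exact ih (k+1) ans (st ++ [k])

-- pvFlush over a run of non-'I' characters ending the string
theorem pvFlush_run_end (ds : List Char) (hds : ∀ c ∈ ds, c ≠ 'I') :
    ∀ (k : Int) (st : List Int), pvFlush ds k st = (st ++ pvAsc k (ds.length + 1)).reverse := by
  induction ds with
  | nil => intro k st; simp [pvFlush, pvAsc]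
  | cons d ds ih =>
    intro k st
    have hd : d ≠ 'I' := hds d (by simp)
    simp only [pvFlush, if_neg hd]
    rw [ih (fun c hc => hds c (by simp [hc])) (k+1) (st ++ [k])]
    have : (st ++ [k]) ++ pvAsc (k+1) (ds.length + 1) = st ++ pvAsc k (ds.length + 1 + 1) := by
      simp only [List.append_assoc, List.singleton_append]; rfl
    rw [this]; rfl

-- pvFlush over a run of non-'I' characters followed by an 'I'
theorem pvFlush_run_I (ds : List Char) (hds : ∀ c ∈ ds, c ≠ 'I') :
    ∀ (rest : List Char) (k : Int) (st : List Int),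
      pvFlush (ds ++ 'I' :: rest) k st
        = (st ++ pvAsc k (ds.length + 1)).reverse ++ pvFlush rest (k + ds.length + 1) [] := by
  induction ds with
  | nil =>
    intro rest k st
    simp [pvFlush, pvAsc]
  | cons d ds ih =>
    intro rest k st
    have hd : d ≠ 'I' := hds d (by simp)
    simp only [List.cons_append, pvFlush, if_neg hd]
    rw [ih (fun c hc => hds c (by simp [hc])) rest (k+1) (st ++ [k])]
    have h1 : (st ++ [k]) ++ pvAsc (k+1) (ds.length + 1) = st ++ pvAsc k (ds.length + 1 + 1) := by
      simp only [List.append_assoc, List.singleton_append]; rfl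
    rw [h1]
    have h2 : (k + 1) + (ds.length : Int) + 1 = k + ((ds.length : Nat) + 1 : Nat) + 1 := by
      push_cast; ring
    rw [h2]
    rfl

-- findRun facts
theorem pvFindRun_le (cs : List Char) (n i : Nat) (h : i ≤ n) : pvFindRun cs n i ≤ n := by
  generalize hk : n - i = k
  induction k generalizing i with
  | zero => unfold pvFindRun; rw [dif_neg (by omega)]; omega
  | succ k ih =>
    unfold pvFindRun
    by_cases h1 : i < n
    · rw [dif_pos h1]
      by_cases h2 : cs.getD i ' ' ≠ 'I'
      · rw [if_pos h2]; exact ih (i+1) h1 (by omega)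
      · rw [if_neg h2]; omega
    · rw [dif_neg h1]; omega

theorem pvFindRun_nonI (cs : List Char) (n i : Nat) :
    ∀ t, i ≤ t → t < pvFindRun cs n i → cs.getD t ' ' ≠ 'I' := by
  generalize hk : n - i = k
  induction k generalizing i with
  | zero =>
    intro t ht1 ht2
    unfold pvFindRun at ht2
    rw [dif_neg (by omega)] at ht2; omega
  | succ k ih =>
    intro t ht1 ht2
    unfold pvFindRun at ht2
    by_cases h1 : i < n
    · rw [dif_pos h1] at ht2
      by_cases h2 : cs.getD i ' ' ≠ 'I'
      · rw [if_pos h2] at ht2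
        rcases Nat.eq_or_lt_of_le ht1 with rfl | hlt
        · exact h2
        · exact ih (i+1) (by omega) t hlt ht2
      · rw [if_neg h2] at ht2; omega
    · rw [dif_neg h1] at ht2; omega

theorem pvFindRun_stop (cs : List Char) (n i : Nat) (h : pvFindRun cs n i < n) :
    cs.getD (pvFindRun cs n i) ' ' = 'I' := by
  generalize hk : n - i = k
  induction k generalizing i with
  | zero =>
    unfold pvFindRun at h ⊢
    by_cases h1 : i < n
    · omega
    · rw [dif_neg h1] at h ⊢; omega
  | succ k ih =>
    unfold pvFindRun at h ⊢
    by_cases h1 : i < n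
    · rw [dif_pos h1] at h ⊢
      by_cases h2 : cs.getD i ' ' ≠ 'I'
      · rw [if_pos h2] at h ⊢; exact ih (i+1) h (by omega)
      · rw [if_neg h2] at h ⊢; exact not_not.mp h2
    · rw [dif_neg h1] at h; omega

-- decompose the character suffix at the end of a run
theorem pv_take_nonI (cs : List Char) (n i j : Nat) (hn : cs.length = n)
    (hj : j ≤ n) (hrun : ∀ t, i ≤ t → t < j → cs.getD t ' ' ≠ 'I') :
    ∀ c ∈ (cs.drop i).take (j - i), c ≠ 'I' := by
  intro c hc
  rw [List.mem_take_iff_getElem] at hc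
  obtain ⟨t, ht, hget⟩ := hc
  rw [List.getElem_drop] at hget
  have hlen : (cs.drop i).length = cs.length - i := by simp
  have hti : i + t < cs.length := by
    have := ht; rw [hlen] at this; omega
  have := hrun (i + t) (by omega) (by omega)
  rw [List.getD_eq_getElem cs ' ' hti] at this
  rw [← hget]; exact this

-- the main loop invariant of B
theorem pvLoopB_eq (cs : List Char) (n : Nat) (hn : cs.length = n) :
    ∀ (m i : Nat) (pre : List Int), n - i ≤ m → i ≤ n → pre.length = i →
      pvLoopB cs n i (pre ++ pvAsc (i + 1) (n + 1 - i))
        = pre ++ pvFlush (cs.drop i) (i + 1) [] := by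
  intro m
  induction m with
  | zero =>
    intro i pre hm hi hpre
    have hin : i = n := by omega
    subst hin
    unfold pvLoopB
    rw [dif_neg (by omega)]
    rw [List.drop_eq_nil_of_le (by omega)]
    simp [pvFlush, pvAsc, show i + 1 - i = 1 by omega]
  | succ m ih =>
    intro i pre hm hi hpre
    by_cases h : i < n
    · unfold pvLoopB
      rw [dif_pos h]
      by_cases hc : cs.getD i ' ' = 'I'
      · rw [dif_pos hc]
        have hstep : pre ++ pvAsc (i + 1) (n + 1 - i)
            = (pre ++ [(i + 1 : Int)]) ++ pvAsc ((i + 1) + 1) (n + 1 - (i + 1)) := by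
          rw [show n + 1 - i = (n + 1 - (i+1)) + 1 by omega]
          simp [pvAsc]
        rw [hstep]
        have ihh := ih (i+1) (pre ++ [(i+1 : Int)]) (by omega) (by omega) (by simp [hpre])
        rw [show (((i+1 : Nat) : Int)) + 1 = (i : Int) + 1 + 1 by push_cast; ring] at ihh
        rw [ihh]
        have hdrop : cs.drop i = 'I' :: cs.drop (i + 1) := by
          rw [List.drop_eq_getElem_cons (by omega)]
          congr 1
          rw [← List.getD_eq_getElem cs ' ' (by omega)]
          exact hc
        rw [hdrop]
        simp only [pvFlush]
        simp
      · rw [dif_neg hc]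
        set j := pvFindRun cs n i with hjdef
        have hij : i < j := pvFindRun_gt cs n i h hc
        have hjn : j ≤ n := pvFindRun_le cs n i (by omega)
        have hrun := pvFindRun_nonI cs n i
        -- compute the spliced list
        have hpreT : (pre ++ pvAsc (i + 1) (n + 1 - i)).take i = pre := by
          rw [List.take_append_of_le_length (by omega), List.take_of_length_le (by omega)]
        have hpreD : (pre ++ pvAsc (i + 1) (n + 1 - i)).drop i = pvAsc (i + 1) (n + 1 - i) := by
          rw [List.drop_append_of_le_length (by omega), List.drop_eq_nil_of_le (by omega)]
          simp
        have hseg : ((pre ++ pvAsc (i + 1) (n + 1 - i)).drop i).take (j + 1 - i)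
            = pvAsc (i + 1) (j + 1 - i) := by
          rw [hpreD, pvAsc_take]
          congr 1; omega
        have htail : (pre ++ pvAsc (i + 1) (n + 1 - i)).drop (j + 1)
            = pvAsc ((j : Int) + 2) (n - j) := by
          rw [List.drop_append, List.drop_eq_nil_of_le (by omega),
            List.nil_append, hpre, pvAsc_drop]
          have h1 : ((i : Int) + 1) + ((j + 1 - i : Nat) : Int) = (j : Int) + 2 := by
            omega
          have h2 : n + 1 - i - (j + 1 - i) = n - j := by omega
          rw [h1, h2]
        set res' := (pre ++ pvAsc (i + 1) (n + 1 - i)).take i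
            ++ (((pre ++ pvAsc (i + 1) (n + 1 - i)).drop i).take (j + 1 - i)).reverse
            ++ (pre ++ pvAsc (i + 1) (n + 1 - i)).drop (j + 1) with hres'
        have hres'eq : res' = (pre ++ (pvAsc (i + 1) (j + 1 - i)).reverse)
            ++ pvAsc ((j : Int) + 2) (n - j) := by
          rw [hres', hpreT, hseg, htail]
        -- ds: the non-'I' run of characters
        have hds : ∀ c ∈ (cs.drop i).take (j - i), c ≠ 'I' :=
          pv_take_nonI cs n i j hn hjn (fun t ht1 ht2 => hrun t ht1 ht2)
        have hdslen : ((cs.drop i).take (j - i)).length = j - i := by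
          rw [List.length_take, List.length_drop, hn]
          omega
        by_cases hje : j < n
        · -- one more step: the char at j is 'I'
          show pvLoopB cs n j res' = _
          unfold pvLoopB
          rw [dif_pos hje, dif_pos (pvFindRun_stop cs n i hje)]
          have hres2 : res' = (pre ++ (pvAsc (i + 1) (j + 1 - i)).reverse)
              ++ pvAsc ((j + 1 : Nat) + 1) (n + 1 - (j + 1)) := by
            rw [hres'eq]
            have h1 : ((j : Int)) + 2 = (((j + 1 : Nat) : Int)) + 1 := by push_cast; ring
            have h2 : n - j = n + 1 - (j + 1) := by omega
            rw [h1, h2]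
          rw [hres2, ih (j+1) (pre ++ (pvAsc (i + 1) (j + 1 - i)).reverse)
              (by omega) (by omega) (by simp [hpre, pvAsc_length]; omega)]
          -- right-hand side via pvFlush_run_I
          have hsplit : cs.drop i = (cs.drop i).take (j - i) ++ 'I' :: cs.drop (j + 1) := by
            conv_lhs => rw [← List.take_append_drop (j - i) (cs.drop i)]
            congr 1
            rw [List.drop_drop]
            rw [show i + (j - i) = j by omega]
            rw [List.drop_eq_getElem_cons (by omega)]
            congr 1
            rw [← List.getD_eq_getElem cs ' ' (by omega)]
            exact pvFindRun_stop cs n i hje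
          rw [hsplit, pvFlush_run_I _ hds, hdslen]
          simp only [List.nil_append, List.append_assoc]
          congr 2
          · congr 2; omega
          · congr 1; push_cast; omega
        · -- j = n: the loop terminates after the splice
          have hjn' : j = n := by omega
          show pvLoopB cs n j res' = _
          unfold pvLoopB
          rw [dif_neg (by omega)]
          rw [hres'eq, hjn']
          simp only [Nat.sub_self, pvAsc, List.append_nil]
          -- rhs via pvFlush_run_end: cs.drop i is entirely the run
          have hall : cs.drop i = (cs.drop i).take (j - i) := by
            rw [hjn', List.take_of_length_le (by simp [hn])]
          rw [hall, pvFlush_run_end _ hds, hdslen]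
          simp only [List.nil_append]
          congr 3
          omega
    · unfold pvLoopB
      rw [dif_neg h]
      have hin : i = n := by omega
      subst hin
      rw [List.drop_eq_nil_of_le (by omega)]
      simp [pvFlush, pvAsc, show i + 1 - i = 1 by omega]

-- ===== VERDICT (by name: the statement is the Claim_ definition above) =====
theorem arrange_guest_arrival_order_spec : Claim_equal_arrange_guest_arrival_order := by
  intro s _
  show arrange_guest_arrival_order s = arrange_guest_arrival_order_alt s
  unfold arrange_guest_arrival_order arrange_guest_arrival_order_alt
  have hA := pvA_fold s.toList 1 [] []
  simp only at hA ⊢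
  rw [hA]
  have hrange : PySem.List.pyRange 1 (s.toList.length + 2) 1
      = pvAsc 1 (s.toList.length + 1) := by
    have := pyRange_eq_pvAsc 1 (s.toList.length + 1)
    rw [show (1 : Int) + ((s.toList.length + 1 : Nat) : Int) = (s.toList.length : Nat) + 2 by push_cast; ring] at this
    exact_mod_cast this
  rw [hrange]
  have hB := pvLoopB_eq s.toList s.toList.length rfl (s.toList.length + 1) 0 []
    (by omega) (by omega) rfl
  simp only [List.nil_append, List.drop_zero, Nat.sub_zero, Nat.cast_zero, zero_add] at hB
  rw [hB]
  simp
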